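-- pv_equiv track=rewrite | github.com/PrathyushaMyla2005/stacks-queues | step9_sort_a_stack.py | sortStack_bruteforce
-- ===== SOURCE A (Python) =====
-- def sortStack_bruteforce(stack):
--     # Step 1: take elements out of stack
--     temp = [] # temporary array to hold stack elements
--
--     while stack: # while stack is not empty
--         temp.append(stack.pop()) # pop elements from stack and add to temp array
--
--     # Step 2: sort the array
--     temp.sort()
--
--     # Step 3: push elements back into stack
--     for num in temp: # iterate through sorted array
--         stack.append(num) # push elements back into stack
--
--     return stack # return sorted stack
-- ===== SOURCE B (Python) =====
-- def sortStack_bruteforce(stack):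
--     # Insertion sort with an auxiliary stack: never calls list.sort.
--     temp = []  # auxiliary stack, kept descending bottom-to-top (top is smallest)
--     while stack:
--         cur = stack.pop()
--         moved = []  # elements of temp smaller than cur, temporarily held aside
--         while temp and temp[-1] < cur:
--             moved.append(temp.pop())
--         temp.append(cur)
--         while moved:
--             temp.append(moved.pop())
--     # pop temp (top = smallest) back onto stack: ascending from the bottom
--     while temp:
--         stack.append(temp.pop())
--     return stack
-- ===== Notes on version B (the rewrite author's own statement) =====
-- stated objective: alternative
-- what changed: Replaces drain-then-builtin-sort with an insertion sort performed by push/pop operations on an auxiliary stack (no call to list.sort).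
import Mathlib
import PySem

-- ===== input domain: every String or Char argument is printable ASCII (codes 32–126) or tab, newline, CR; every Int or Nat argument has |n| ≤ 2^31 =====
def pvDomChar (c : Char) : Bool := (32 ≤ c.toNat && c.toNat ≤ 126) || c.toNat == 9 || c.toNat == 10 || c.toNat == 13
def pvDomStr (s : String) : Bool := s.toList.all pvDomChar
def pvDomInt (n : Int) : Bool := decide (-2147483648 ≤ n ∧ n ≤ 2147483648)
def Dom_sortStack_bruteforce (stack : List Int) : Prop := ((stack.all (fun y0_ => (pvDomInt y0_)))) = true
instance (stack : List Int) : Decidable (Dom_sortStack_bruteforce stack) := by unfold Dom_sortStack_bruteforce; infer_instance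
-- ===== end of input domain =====

-- B replaces drain-then-builtin-sort with a push/pop insertion sort on an auxiliary
-- stack (no call to sort); both Pythons sort `stack` in place and return the same
-- object — the theorems here are about the returned value.

-- ===== PORT A =====
-- while stack: temp.append(stack.pop())  — the popped elements arrive head-first
-- in `stack.reverse`, so the drain loop recurses on that reversed view.
def pvDrainA (popped : List Int) (temp : List Int) : List Int :=
  match popped with
  | [] => temp
  | x :: rest => pvDrainA rest (temp ++ [x])

-- for num in temp: stack.append(num)
def pvPushBackA (temp : List Int) (stack : List Int) : List Int :=
  match temp with
  | [] => stack
  | n :: rest => pvPushBackA rest (stack ++ [n])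

def sortStack_bruteforce (stack : List Int) : List Int :=
  let temp := pvDrainA stack.reverse []
  let temp := PySem.List.sorted temp (fun x => x) false
  pvPushBackA temp []

-- ===== PORT B =====
-- inner loops: pop temp while its top is < cur, push cur, push the moved ones back.
-- `temp` is kept top-first (head = Python temp[-1]).
def pvInsertB (cur : Int) (temp : List Int) : List Int :=
  match temp with
  | [] => [cur]
  | t :: rest => if t < cur then t :: pvInsertB cur rest else cur :: t :: rest

-- outer while: pop cur from stack (head-first in stack.reverse) and insert into temp
def pvOuterB (popped : List Int) (temp : List Int) : List Int :=
  match popped with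
  | [] => temp
  | cur :: rest => pvOuterB rest (pvInsertB cur temp)

def sortStack_bruteforce_alt (stack : List Int) : List Int :=
  -- final loop pops temp top-first back onto the emptied stack, i.e. returns temp itself
  pvOuterB stack.reverse []

-- ===== PRECONDITION & SPEC =====
def Spec_sortStack_bruteforce (stack : List Int) (out : List Int) : Prop := out = sortStack_bruteforce_alt stack
instance (stack : List Int) (out : List Int) : Decidable (Spec_sortStack_bruteforce stack out) := by unfold Spec_sortStack_bruteforce; infer_instance

-- ===== CLAIM (what is proved, stated in full; the proofs are below) =====
def Claim_equal_sortStack_bruteforce : Prop := ∀ (stack : List Int), Dom_sortStack_bruteforce stack → Spec_sortStack_bruteforce stack (sortStack_bruteforce stack)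

-- ===== LEMMAS AND PROOFS =====

theorem pvDrainA_eq (popped temp : List Int) : pvDrainA popped temp = temp ++ popped := by
  induction popped generalizing temp with
  | nil => simp [pvDrainA]
  | cons x rest ih => simp [pvDrainA, ih]

theorem pvPushBackA_eq (temp stack : List Int) : pvPushBackA temp stack = stack ++ temp := by
  induction temp generalizing stack with
  | nil => simp [pvPushBackA]
  | cons n rest ih => simp [pvPushBackA, ih]

theorem pvInsertB_perm (cur : Int) (temp : List Int) :
    (pvInsertB cur temp).Perm (cur :: temp) := by
  induction temp with
  | nil => simp [pvInsertB]
  | cons t rest ih =>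
    simp only [pvInsertB]
    split
    · exact (ih.cons t).trans (List.Perm.swap cur t rest)
    · exact List.Perm.refl _

theorem mem_pvInsertB {y cur : Int} {temp : List Int} (h : y ∈ pvInsertB cur temp) :
    y = cur ∨ y ∈ temp := by
  have := (pvInsertB_perm cur temp).mem_iff.mp h
  simpa using this

theorem pvInsertB_pairwise (cur : Int) (temp : List Int)
    (h : temp.Pairwise (· ≤ ·)) : (pvInsertB cur temp).Pairwise (· ≤ ·) := by
  induction temp with
  | nil => simp [pvInsertB]
  | cons t rest ih =>
    rw [List.pairwise_cons] at h
    simp only [pvInsertB]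
    split
    · rename_i hlt
      refine List.pairwise_cons.mpr ⟨?_, ih h.2⟩
      intro y hy
      rcases mem_pvInsertB hy with rfl | hy
      · exact le_of_lt hlt
      · exact h.1 y hy
    · rename_i hge
      refine List.pairwise_cons.mpr ⟨?_, List.pairwise_cons.mpr h⟩
      intro y hy
      rcases List.mem_cons.mp hy with rfl | hy
      · omega
      · exact le_trans (by omega) (h.1 y hy)

theorem pvOuterB_perm (popped temp : List Int) :
    (pvOuterB popped temp).Perm (temp ++ popped) := by
  induction popped generalizing temp with
  | nil => simp [pvOuterB]
  | cons cur rest ih =>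
    have h1 := ih (pvInsertB cur temp)
    have h2 : ((pvInsertB cur temp) ++ rest).Perm (temp ++ cur :: rest) :=
      ((pvInsertB_perm cur temp).append_right rest).trans
        (show ((cur :: temp) ++ rest).Perm (temp ++ cur :: rest) by
          simpa using List.perm_middle.symm)
    simpa [pvOuterB] using h1.trans h2

theorem pvOuterB_pairwise (popped temp : List Int) (h : temp.Pairwise (· ≤ ·)) :
    (pvOuterB popped temp).Pairwise (· ≤ ·) := by
  induction popped generalizing temp with
  | nil => simpa [pvOuterB]
  | cons cur rest ih => exact ih _ (pvInsertB_pairwise cur temp h)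

theorem sorted_eq_outer (xs : List Int) :
    PySem.List.sorted xs (fun x => x) false = pvOuterB xs [] := by
  have hp : (pvOuterB xs []).Perm xs := by simpa using pvOuterB_perm xs []
  exact PySem.List.sorted_id_eq_of_perm_of_pairwise _ _ hp (pvOuterB_pairwise xs [] (by simp))

-- ===== VERDICT (by name: the statement is the Claim_ definition above) =====
theorem sortStack_bruteforce_spec : Claim_equal_sortStack_bruteforce := by
  intro stack _
  show _ = _
  simp only [sortStack_bruteforce, sortStack_bruteforce_alt, pvDrainA_eq, pvPushBackA_eq,
    List.nil_append]
  exact sorted_eq_outer stack.reverse
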